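-- pv_equiv track=rewrite | github.com/Infrapink/calconv | athenian_metonic_e.py | nyd
-- ===== SOURCE A (Python) =====
-- epoch = 1563449
--
-- leaps = (1, 4, 7, 9, 12, 15, 17) # if the year gives a remainder in this tuple when divided by 19, it's a leap year. See Hannah, p. 57. This tuple is adjusted to count from 0 rather than 1.
--
-- def nyd(year):
--     '''Compute the Julian Day on which a given year begins'''
--     year = int(year)
--     if (year > 0):
--         # ancient Greeks did not accept the number 0
--         year -= 1
--
--     y = 19 * (year // 19)
--     noumenia = epoch + (6936 * (year // 19))
--     while (y < year):
--         noumenia += (354 + (30 * int(y % 19 in leaps)))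
--         y += 1
--
--     return noumenia
-- ===== SOURCE B (Python) =====
-- epoch = 1563449
--
-- leaps = (1, 4, 7, 9, 12, 15, 17)
--
-- def nyd(year):
--     '''Compute the Julian Day on which a given year begins'''
--     year = int(year)
--     if year > 0:
--         year -= 1
--     q, r = divmod(year, 19)
--     return epoch + 6936 * q + 354 * r + 30 * sum(1 for l in leaps if l < r)
-- ===== Notes on version B (the rewrite author's own statement) =====
-- stated objective: simpler
-- what changed: Replaces the per-year while loop over the metonic cycle with a closed-form arithmetic expression built from the quotient and remainder of the adjusted year by the cycle length and a count of leap indices below that remainder.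
import Mathlib
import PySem

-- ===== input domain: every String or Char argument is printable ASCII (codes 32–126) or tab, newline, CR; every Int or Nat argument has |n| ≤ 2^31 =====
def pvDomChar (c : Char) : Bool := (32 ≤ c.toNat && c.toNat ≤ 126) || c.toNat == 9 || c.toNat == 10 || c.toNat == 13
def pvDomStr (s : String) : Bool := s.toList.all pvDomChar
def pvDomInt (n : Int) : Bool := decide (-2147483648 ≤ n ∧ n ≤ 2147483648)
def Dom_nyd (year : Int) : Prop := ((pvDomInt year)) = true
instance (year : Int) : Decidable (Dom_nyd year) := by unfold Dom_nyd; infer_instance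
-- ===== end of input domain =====

-- B replaces A's per-year while loop with a closed-form arithmetic expression (objective: simpler).

-- ===== PORT A =====
def pvLeaps : List Int := [1, 4, 7, 9, 12, 15, 17]

-- the 'while (y < year)' loop of A, recursion on the remaining distance
def nydLoop (year y noumenia : Int) : Int :=
  if y < year then
    nydLoop year (y + 1)
      (noumenia + (354 + 30 * (if pvLeaps.contains (PySem.Int.mod y 19) then 1 else 0)))
  else noumenia
termination_by (year - y).toNat
decreasing_by omega

def nyd (year : Int) : Int :=
  let year := if year > 0 then year - 1 else year
  let q := PySem.Int.floordiv year 19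
  nydLoop year (19 * q) (1563449 + 6936 * q)

-- ===== PORT B =====
def nyd_alt (year : Int) : Int :=
  let year := if year > 0 then year - 1 else year
  let q := PySem.Int.floordiv year 19
  let r := PySem.Int.mod year 19
  1563449 + 6936 * q + 354 * r +
    30 * (pvLeaps.foldl (fun acc l => if l < r then acc + 1 else acc) 0)

-- ===== PRECONDITION & SPEC =====
def Spec_nyd (year : Int) (out : Int) : Prop := out = nyd_alt year
instance (year : Int) (out : Int) : Decidable (Spec_nyd year out) := by unfold Spec_nyd; infer_instance

-- ===== CLAIM (what is proved, stated in full; the proofs are below) =====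
def Claim_equal_nyd : Prop := ∀ (year : Int), Dom_nyd year → Spec_nyd year (nyd year)

-- ===== LEMMAS AND PROOFS =====

-- sum of the n loop-body increments starting at in-cycle index k
def pvS (k n : Nat) : Int :=
  match n with
  | 0 => 0
  | n + 1 => (354 + 30 * (if pvLeaps.contains (k : Int) then 1 else 0)) + pvS (k + 1) n

lemma pvMod19 (q : Int) (k : Nat) (hk : k < 19) :
    PySem.Int.mod (19 * q + k) 19 = (k : Int) := by
  rw [PySem.Int.mod_eq_emod_of_pos (by norm_num)]
  omega

lemma loop_eq (n : Nat) : ∀ (q acc : Int) (k : Nat), k + n ≤ 19 →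
    nydLoop (19 * q + k + n) (19 * q + k) acc = acc + pvS k n := by
  induction n with
  | zero =>
    intro q acc k _
    rw [nydLoop]
    simp [pvS]
  | succ n ih =>
    intro q acc k hk
    rw [nydLoop]
    have hlt : 19 * q + (k : Int) < 19 * q + k + (n + 1 : Nat) := by push_cast; omega
    rw [if_pos hlt, pvMod19 q k (by omega)]
    have h1 : 19 * q + (k : Int) + 1 = 19 * q + ((k + 1 : Nat) : Int) := by push_cast; ring
    have h2 : 19 * q + (k : Int) + ((n + 1 : Nat) : Int) = 19 * q + ((k + 1 : Nat) : Int) + (n : Int) := by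
      push_cast; ring
    rw [h2, h1, ih q _ (k + 1) (by omega)]
    simp [pvS]; ring

lemma pvS_closed : ∀ m : Nat, m < 19 →
    pvS 0 m = 354 * (m : Int) +
      30 * (pvLeaps.foldl (fun acc l => if l < (m : Int) then acc + 1 else acc) 0) := by
  decide

-- ===== VERDICT (by name: the statement is the Claim_ definition above) =====
theorem nyd_spec : Claim_equal_nyd := by
  intro year _
  unfold Spec_nyd nyd nyd_alt
  set y := if year > 0 then year - 1 else year with hy
  set q := PySem.Int.floordiv y 19 with hq
  set r := PySem.Int.mod y 19 with hr
  have hr0 : 0 ≤ r := by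
    rw [hr, PySem.Int.mod_eq_emod_of_pos (by norm_num)]; omega
  have hr19 : r < 19 := by
    rw [hr, PySem.Int.mod_eq_emod_of_pos (by norm_num)]; omega
  have hdm : q * 19 + r = y := PySem.Int.floordiv_mul_add_mod y 19
  have hm : ((r.toNat : Int)) = r := Int.toNat_of_nonneg hr0
  have hyeq : y = 19 * q + (0 : Nat) + (r.toNat : Nat) := by push_cast [hm]; omega
  calc nydLoop y (19 * q) (1563449 + 6936 * q)
      = nydLoop (19 * q + (0 : Nat) + (r.toNat : Nat)) (19 * q + (0 : Nat)) (1563449 + 6936 * q) := by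
        rw [← hyeq]; norm_num
    _ = (1563449 + 6936 * q) + pvS 0 r.toNat := loop_eq r.toNat q _ 0 (by omega)
    _ = 1563449 + 6936 * q + 354 * r +
        30 * (pvLeaps.foldl (fun acc l => if l < r then acc + 1 else acc) 0) := by
        rw [pvS_closed r.toNat (by omega), hm]; ring
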